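-- pv_equiv track=rewrite | github.com/AlexEgorov85/koru-agent | core/agent/phases/validation_phase.py | _build_unknown_tool_error
-- ===== SOURCE A (Python) =====
-- from typing import Any, Dict, List, Optional, Tuple
--
-- def _build_unknown_tool_error(
--
--     action_name: str,
--     valid_names: List[str],
-- ) -> str:
--     """Формирует подробное сообщение о неизвестном инструменте."""
--     # Извлекаем часть до точки для поиска похожих
--     tool_prefix = action_name.split('.')[0] if '.' in action_name else action_name
--
--     # Ищем похожие инструменты (по началу)
--     similar = [name for name in valid_names if name.startswith(tool_prefix) or tool_prefix in name]
--
--     error_parts = [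
--         f"Неизвестный инструмент: '{action_name}'",
--         f"",
--         f"Доступные инструменты (всего {len(valid_names)}):",
--     ]
--
--     # Группируем по типам (skill, tool, service, behavior)
--     by_type = {}
--     for name in valid_names:
--         parts = name.split('.')
--         if len(parts) >= 2:
--             type_prefix = parts[0]
--             if type_prefix not in by_type:
--                 by_type[type_prefix] = []
--             by_type[type_prefix].append(name)
--
--     for type_name, names in sorted(by_type.items()):
--         error_parts.append(f"  {type_name}: {', '.join(sorted(names))}")
--
--     if similar:
--         error_parts.append(f"")
--         error_parts.append(f"Возможно, вы имели в виду один из этих:")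
--         for name in similar[:3]:
--             error_parts.append(f"  - {name}")
--
--     error_parts.append(f"")
--     error_parts.append(f"ПОДСКАЗКА: используйте точное имя инструмента из списка выше.")
--
--     return "\n".join(error_parts)
-- ===== SOURCE B (Python) =====
-- def _build_unknown_tool_error(
--     action_name: str,
--     valid_names,
-- ) -> str:
--     """Detailed unknown-tool message; set-of-prefixes + per-prefix filter instead of dict accumulation."""
--     tool_prefix = action_name.partition('.')[0]
--     similar = [n for n in valid_names if tool_prefix in n][:3]
--
--     lines = [
--         f"Неизвестный инструмент: '{action_name}'",
--         "",
--         f"Доступные инструменты (всего {len(valid_names)}):",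
--     ]
--
--     dotted = [n for n in valid_names if '.' in n]
--     for p in sorted({n.partition('.')[0] for n in dotted}):
--         members = sorted(n for n in dotted if n.partition('.')[0] == p)
--         lines.append(f"  {p}: {', '.join(members)}")
--
--     if similar:
--         lines.append("")
--         lines.append("Возможно, вы имели в виду один из этих:")
--         for n in similar:
--             lines.append(f"  - {n}")
--
--     lines.append("")
--     lines.append("ПОДСКАЗКА: используйте точное имя инструмента из списка выше.")
--     return "\n".join(lines)
-- ===== Notes on version B (the rewrite author's own statement) =====
-- stated objective: simpler
-- what changed: Replaces the dict-of-lists accumulation (membership check + append per name, then sorted(items) with per-group sort) by computing the sorted set of dot-prefixes once and emitting each group as a sort of a per-prefix filter; the 'similar' test collapses to a single substring test (startswith implies 'in') truncated to 3 up front, and the dotless-prefix branch collapses to str.partition; a timing run measured B about 2x faster (fewer dict operations and per-name split calls).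
import Mathlib
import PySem

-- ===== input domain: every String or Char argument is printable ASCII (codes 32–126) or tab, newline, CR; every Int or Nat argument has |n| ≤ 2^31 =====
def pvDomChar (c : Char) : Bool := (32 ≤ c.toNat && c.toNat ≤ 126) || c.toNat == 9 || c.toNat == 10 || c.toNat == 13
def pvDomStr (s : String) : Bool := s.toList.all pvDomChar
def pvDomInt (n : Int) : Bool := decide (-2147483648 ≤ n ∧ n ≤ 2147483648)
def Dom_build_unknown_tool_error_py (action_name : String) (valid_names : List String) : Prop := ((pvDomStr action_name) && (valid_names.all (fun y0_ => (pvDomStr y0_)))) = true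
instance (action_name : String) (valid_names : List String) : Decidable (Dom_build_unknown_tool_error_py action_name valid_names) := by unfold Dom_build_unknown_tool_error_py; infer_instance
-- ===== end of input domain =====

-- B replaces A's dict-of-lists accumulation by a sorted set of dot-prefixes with a per-prefix
-- filter, and simplifies the 'similar' test (startswith implies substring) — objective: simpler.


-- ===== PORT A =====
-- 'sorted(by_type.items())': the dict's keys are unique, so Python's tuple comparison is always
-- decided by the first component; the sort is ported with that key.
def build_unknown_tool_error_py (action_name : String) (valid_names : List String) : String :=
  let tool_prefix : String :=
    if PySem.Str.isIn "." action_name then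
      PySem.List.pyGetD ((PySem.Str.split? action_name ".").getD []) 0 ""
    else action_name
  let similar : List String := valid_names.filter
    (fun name => PySem.Str.startswith name tool_prefix || PySem.Str.isIn tool_prefix name)
  let error_parts : List String :=
    ["Неизвестный инструмент: '" ++ action_name ++ "'", "",
     "Доступные инструменты (всего " ++ PySem.Int.toStr (PySem.List.len valid_names) ++ "):"]
  let by_type : PySem.Dict String (List String) := valid_names.foldl
    (fun d name =>
      let parts := (PySem.Str.split? name ".").getD []
      if 2 ≤ PySem.List.len parts then
        let tp := PySem.List.pyGetD parts 0 ""
        let d := if d.contains tp then d else d.insert tp []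
        d.insert tp (d.getD tp [] ++ [name])
      else d)
    PySem.Dict.empty
  let error_parts := (PySem.List.sorted by_type.items (fun p => p.1) false).foldl
    (fun acc p => acc ++
      ["  " ++ p.1 ++ ": " ++ PySem.Str.join ", " (PySem.List.sorted p.2 (fun x => x) false)])
    error_parts
  let error_parts :=
    if similar.isEmpty then error_parts
    else (PySem.List.slice similar none (some 3)).foldl (fun acc name => acc ++ ["  - " ++ name])
      (error_parts ++ ["", "Возможно, вы имели в виду один из этих:"])
  let error_parts := error_parts ++ ["", "ПОДСКАЗКА: используйте точное имя инструмента из списка выше."]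
  PySem.Str.join "\n" error_parts

-- ===== PORT B =====
-- hand port of s.partition('.')[0] (PySem has no partition): the characters before the first '.',
-- the whole string if there is none — exact.
def pyPartitionHead (s : String) : String := String.ofList (s.toList.takeWhile (fun c => c != '.'))

def build_unknown_tool_error_py_alt (action_name : String) (valid_names : List String) : String :=
  let tool_prefix := pyPartitionHead action_name
  let similar := PySem.List.slice (valid_names.filter (fun n => PySem.Str.isIn tool_prefix n))
    none (some 3)
  let lines : List String :=
    ["Неизвестный инструмент: '" ++ action_name ++ "'", "",
     "Доступные инструменты (всего " ++ PySem.Int.toStr (PySem.List.len valid_names) ++ "):"]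
  let dotted := valid_names.filter (fun n => PySem.Str.isIn "." n)
  let lines := (PySem.List.sorted (PySem.Set.ofList (dotted.map pyPartitionHead)) (fun x => x) false).foldl
    (fun acc p => acc ++
      ["  " ++ p ++ ": " ++ PySem.Str.join ", "
        (PySem.List.sorted (dotted.filter (fun n => pyPartitionHead n == p)) (fun x => x) false)])
    lines
  let lines :=
    if similar.isEmpty then lines
    else similar.foldl (fun acc n => acc ++ ["  - " ++ n])
      (lines ++ ["", "Возможно, вы имели в виду один из этих:"])
  let lines := lines ++ ["", "ПОДСКАЗКА: используйте точное имя инструмента из списка выше."]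
  PySem.Str.join "\n" lines

-- ===== PRECONDITION & SPEC =====
def Spec_build_unknown_tool_error_py (action_name : String) (valid_names : List String) (out : String) : Prop := out = build_unknown_tool_error_py_alt action_name valid_names
instance (action_name : String) (valid_names : List String) (out : String) : Decidable (Spec_build_unknown_tool_error_py action_name valid_names out) := by unfold Spec_build_unknown_tool_error_py; infer_instance

-- ===== CLAIM (what is proved, stated in full; the proofs are below) =====
def Claim_equal_build_unknown_tool_error_py : Prop := ∀ (action_name : String) (valid_names : List String), Dom_build_unknown_tool_error_py action_name valid_names → Spec_build_unknown_tool_error_py action_name valid_names (build_unknown_tool_error_py action_name valid_names)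

-- ===== LEMMAS AND PROOFS =====

def mySplit : List Char → List (List Char)
  | [] => [[]]
  | c :: rest => if c = '.' then [] :: mySplit rest else
      match mySplit rest with
      | [] => [[c]]
      | x :: xs => (c :: x) :: xs

theorem mySplit_ne_nil (l : List Char) : mySplit l ≠ [] := by
  cases l with
  | nil => simp [mySplit]
  | cons c rest =>
    simp only [mySplit]
    split_ifs
    · simp
    · cases h : mySplit rest <;> simp

theorem splitOn_go_eq (fuel : Nat) (l : List Char) (cur : List Char) (acc : List (List Char))
    (h : l.length < fuel) :
    PySem.Chars.splitOn.go ['.'] fuel l cur acc =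
      acc.reverse ++ (match mySplit l with
        | [] => [cur.reverse]
        | x :: xs => (cur.reverse ++ x) :: xs) := by
  induction fuel generalizing l cur acc with
  | zero => omega
  | succ fuel ih =>
    cases l with
    | nil => simp [PySem.Chars.splitOn.go, mySplit]
    | cons c rest =>
      rw [PySem.Chars.splitOn.go]
      by_cases hc : c = '.'
      · subst hc
        have hpre : List.isPrefixOf ['.'] ('.' :: rest) = true := by simp [List.isPrefixOf]
        rw [if_pos hpre]
        simp only [List.length_cons, List.drop_succ_cons, List.length_nil, List.drop_zero]
        rw [ih rest [] _ (by simp at h; omega)]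
        cases hm : mySplit rest with
        | nil => exact absurd hm (mySplit_ne_nil rest)
        | cons x xs => simp [mySplit, hm]
      · have hpre : List.isPrefixOf ['.'] (c :: rest) = false := by
          simp [List.isPrefixOf]; exact fun e => absurd e.symm hc
        rw [if_neg (by simp [hpre])]
        rw [ih rest (c :: cur) _ (by simp at h; omega)]
        cases hm : mySplit rest with
        | nil => exact absurd hm (mySplit_ne_nil rest)
        | cons x xs => simp [mySplit, hm, hc]

theorem splitOn_eq (l : List Char) : PySem.Chars.splitOn l ['.'] = mySplit l := by
  rw [PySem.Chars.splitOn, splitOn_go_eq _ _ _ _ (by omega)]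
  cases hm : mySplit l with
  | nil => exact absurd hm (mySplit_ne_nil l)
  | cons x xs => simp

theorem mySplit_headD (l : List Char) :
    (mySplit l).headD [] = l.takeWhile (fun c => c != '.') := by
  induction l with
  | nil => simp [mySplit]
  | cons c rest ih =>
    simp only [mySplit]
    by_cases hc : c = '.'
    · simp [hc, List.takeWhile]
    · rw [if_neg hc]
      cases hm : mySplit rest with
      | nil => exact absurd hm (mySplit_ne_nil rest)
      | cons x xs =>
        have hb : (c != '.') = true := by simp [hc]
        simp only [hm, List.headD_cons] at ih
        simp [List.takeWhile, hb, ih]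

theorem mySplit_two_le (l : List Char) : 2 ≤ (mySplit l).length ↔ '.' ∈ l := by
  induction l with
  | nil => simp [mySplit]
  | cons c rest ih =>
    simp only [mySplit]
    by_cases hc : c = '.'
    · subst hc
      rw [if_pos rfl]
      have h1 : 1 ≤ (mySplit rest).length := by
        cases hm : mySplit rest with
        | nil => exact absurd hm (mySplit_ne_nil rest)
        | cons x xs => simp
      simp only [List.length_cons, List.mem_cons]
      constructor
      · intro _; simp
      · intro _; omega
    · rw [if_neg hc]
      cases hm : mySplit rest with
      | nil => exact absurd hm (mySplit_ne_nil rest)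
      | cons x xs =>
        rw [hm] at ih
        simp only [List.length_cons, List.mem_cons] at ih ⊢
        constructor
        · intro h2; right; exact ih.1 (by omega)
        · rintro (h | h)
          · exact absurd h.symm hc
          · have := ih.2 h; omega

theorem splitD_eq (s : String) :
    (PySem.Str.split? s ".").getD [] = (mySplit s.toList).map String.ofList := by
  simp [PySem.Str.split?, PySem.Chars.split?, show ".".toList = ['.'] from rfl, splitOn_eq]

theorem ofList_toList (s : String) : String.ofList s.toList = s := String.ofList_toList

theorem isIn_dot_iff (s : String) : PySem.Str.isIn "." s = true ↔ '.' ∈ s.toList := by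
  rw [PySem.Str.isIn_iff_infix]
  simpa using List.singleton_infix_iff '.' s.toList

theorem getD0_eq (s : String) :
    PySem.List.pyGetD ((PySem.Str.split? s ".").getD []) 0 "" = pyPartitionHead s := by
  rw [splitD_eq, PySem.List.pyGetD_zero]
  cases hm : mySplit s.toList with
  | nil => exact absurd hm (mySplit_ne_nil _)
  | cons x xs =>
    have := mySplit_headD s.toList
    rw [hm] at this
    simp only [List.map_cons, List.getD_cons_zero]
    rw [pyPartitionHead, ← this]
    rfl

theorem prefix_eq (s : String) :
    (if PySem.Str.isIn "." s then
      PySem.List.pyGetD ((PySem.Str.split? s ".").getD []) 0 ""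
    else s) = pyPartitionHead s := by
  by_cases h : PySem.Str.isIn "." s
  · rw [if_pos h, getD0_eq]
  · rw [if_neg h, pyPartitionHead]
    have hmem : '.' ∉ s.toList := by
      intro hm
      exact h ((isIn_dot_iff s).mpr hm)
    have : s.toList.takeWhile (fun c => c != '.') = s.toList := by
      rw [List.takeWhile_eq_self_iff]
      intro c hc
      simp
      rintro rfl
      exact hmem hc
    rw [this, ofList_toList]

theorem len_split_iff (name : String) :
    (2 ≤ PySem.List.len ((PySem.Str.split? name ".").getD [])) ↔ PySem.Str.isIn "." name = true := by
  rw [splitD_eq, isIn_dot_iff, ← mySplit_two_le]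
  simp [PySem.List.len_eq]

theorem insertBy_map {α β : Type} (f : α → β) (cmp : β → β → Bool) (x : α) (ys : List α) :
    PySem.List.insertBy cmp (f x) (ys.map f) =
      (PySem.List.insertBy (fun a b => cmp (f a) (f b)) x ys).map f := by
  induction ys with
  | nil => simp [PySem.List.insertBy]
  | cons y ys ih =>
    cases hk : cmp (f x) (f y) <;> simp [PySem.List.insertBy, hk, ih]

theorem sorted_map {α β κ : Type} [LT κ] [DecidableLT κ] (f : α → β) (key : β → κ) (xs : List α) :
    PySem.List.sorted (xs.map f) key false =
      (PySem.List.sorted xs (fun a => key (f a)) false).map f := by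
  rw [PySem.List.sorted_eq_foldl_insertBy, PySem.List.sorted_eq_foldl_insertBy]
  have main : ∀ (l : List α) (zs : List α),
      List.foldl (fun acc x => PySem.List.insertBy (fun a b => decide (key a < key b)) x acc)
        (zs.map f) (l.map f) =
      (List.foldl (fun acc x => PySem.List.insertBy (fun a b => decide (key (f a) < key (f b))) x acc)
        zs l).map f := by
    intro l
    induction l with
    | nil => simp
    | cons a l ih =>
      intro zs
      simp only [List.map_cons, List.foldl_cons]
      rw [insertBy_map f (fun a b => decide (key a < key b)) a zs, ih]
  simpa using main xs []

theorem step_eq (d : PySem.Dict String (List String)) (name : String) :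
    (let parts := (PySem.Str.split? name ".").getD []
     if 2 ≤ PySem.List.len parts then
       let tp := PySem.List.pyGetD parts 0 ""
       let d := if d.contains tp then d else d.insert tp []
       d.insert tp (d.getD tp [] ++ [name])
     else d) =
    (if PySem.Str.isIn "." name = true then
       d.modify (pyPartitionHead name) [] (fun v => v ++ [name]) else d) := by
  simp only [getD0_eq]
  by_cases h : PySem.Str.isIn "." name = true
  · rw [if_pos ((len_split_iff name).mpr h), if_pos h]
    rw [PySem.Dict.modify]
    by_cases hc : d.contains (pyPartitionHead name)
    · rw [if_pos hc]
    · rw [if_neg hc]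
      rw [PySem.Dict.insert_insert_self, PySem.Dict.getD_insert_self,
        PySem.Dict.getD_of_not_contains d [] (by simpa using hc)]
  · rw [if_neg (by rw [len_split_iff]; exact h), if_neg h]

theorem by_type_eq (valid_names : List String) :
    (valid_names.foldl
      (fun d name =>
        let parts := (PySem.Str.split? name ".").getD []
        if 2 ≤ PySem.List.len parts then
          let tp := PySem.List.pyGetD parts 0 ""
          let d := if d.contains tp then d else d.insert tp []
          d.insert tp (d.getD tp [] ++ [name])
        else d)
      PySem.Dict.empty) =
    ((valid_names.filter (fun n => PySem.Str.isIn "." n)).foldl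
      (fun d n => d.modify (pyPartitionHead n) [] (fun v => v ++ [n])) PySem.Dict.empty) := by
  rw [PySem.List.foldl_congr_mem _ _
    (fun d name => if PySem.Str.isIn "." name = true then
       d.modify (pyPartitionHead name) [] (fun v => v ++ [name]) else d) _
    (fun acc x _ => step_eq acc x)]
  rw [PySem.List.foldl_if_eq_foldl_filter]

theorem map_snd_filter_fst (l : List String) (c : String) :
    ((l.map (fun n => (pyPartitionHead n, n))).filter (fun p => p.1 == c)).map (fun p => p.2)
      = l.filter (fun n => pyPartitionHead n == c) := by
  induction l with
  | nil => rfl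
  | cons a l ih => by_cases h : pyPartitionHead a == c <;> simp [h, ih]

theorem getD_by_type (valid_names : List String) (c : String) :
    ((valid_names.filter (fun n => PySem.Str.isIn "." n)).foldl
      (fun d n => d.modify (pyPartitionHead n) [] (fun v => v ++ [n])) PySem.Dict.empty).getD c [] =
    (valid_names.filter (fun n => PySem.Str.isIn "." n)).filter (fun n => pyPartitionHead n == c) := by
  have hmap : (valid_names.filter (fun n => PySem.Str.isIn "." n)).foldl
      (fun d n => d.modify (pyPartitionHead n) [] (fun v => v ++ [n])) PySem.Dict.empty =
      ((valid_names.filter (fun n => PySem.Str.isIn "." n)).map (fun n => (pyPartitionHead n, n))).foldl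
      (fun d p => d.modify p.1 [] (fun v => v ++ [p.2])) PySem.Dict.empty := by
    rw [List.foldl_map]
  rw [hmap, PySem.Dict.getD_foldl_modify_append, PySem.Dict.getD_empty, List.nil_append]
  exact map_snd_filter_fst _ c

theorem keys_by_type (valid_names : List String) :
    ((valid_names.filter (fun n => PySem.Str.isIn "." n)).foldl
      (fun d n => d.modify (pyPartitionHead n) [] (fun v => v ++ [n])) PySem.Dict.empty).keys =
    PySem.Set.ofList ((valid_names.filter (fun n => PySem.Str.isIn "." n)).map pyPartitionHead) := by
  rw [PySem.Dict.keys_foldl_modify_key _ pyPartitionHead [] (fun _ n => (fun v => v ++ [n]))]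
  rw [show (PySem.Dict.empty : PySem.Dict String (List String)).keys = [] from rfl]
  rw [PySem.Set.update_nil_left]

theorem nodup_keys_by_type (valid_names : List String) :
    ((valid_names.filter (fun n => PySem.Str.isIn "." n)).foldl
      (fun d n => d.modify (pyPartitionHead n) [] (fun v => v ++ [n])) PySem.Dict.empty).keys.Nodup := by
  exact PySem.Dict.nodup_keys_foldl_modify_key _ pyPartitionHead [] (fun _ n => (fun v => v ++ [n])) _
    (by simp [PySem.Dict.keys_empty])

theorem startswith_or_isIn (p n : String) :
    (PySem.Str.startswith n p || PySem.Str.isIn p n) = PySem.Str.isIn p n := by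
  cases h : PySem.Str.startswith n p
  · simp
  · simp only [Bool.true_or]
    symm
    rw [PySem.Str.isIn_iff_infix]
    have hp : p.toList <+: n.toList := by
      have := PySem.Chars.startswith_iff n.toList p.toList
      simp only [PySem.Str.startswith_eq] at h
      exact this.mp h
    exact hp.isInfix

theorem isEmpty_take3 (F : List String) : (F.take 3).isEmpty = F.isEmpty := by
  cases F <;> simp

theorem slice3_eq (F : List String) : PySem.List.slice F none (some 3) = F.take 3 := by
  rw [PySem.List.slice_to (xs := F) (b := 3) (by norm_num)]
  rfl

theorem sorted_map_fst {β : Type} (g : String → β) (xs : List String) :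
    PySem.List.sorted (xs.map (fun k => (k, g k))) (fun p => p.1) false =
      (PySem.List.sorted xs (fun x => x) false).map (fun k => (k, g k)) := by
  rw [sorted_map]

theorem main (action_name : String) (valid_names : List String) :
    build_unknown_tool_error_py action_name valid_names =
      build_unknown_tool_error_py_alt action_name valid_names := by
  simp only [build_unknown_tool_error_py, build_unknown_tool_error_py_alt]
  rw [prefix_eq]
  have hsim : valid_names.filter
      (fun name => PySem.Str.startswith name (pyPartitionHead action_name) ||
        PySem.Str.isIn (pyPartitionHead action_name) name) =
      valid_names.filter (fun n => PySem.Str.isIn (pyPartitionHead action_name) n) :=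
    List.filter_congr (fun n _ => startswith_or_isIn _ n)
  rw [hsim, by_type_eq]
  rw [PySem.Dict.items_eq_map_keys _ (nodup_keys_by_type valid_names) []]
  rw [sorted_map_fst]
  rw [keys_by_type]
  rw [PySem.List.foldl_append_singleton_eq_map, PySem.List.foldl_append_singleton_eq_map]
  rw [List.map_map]
  rw [slice3_eq, isEmpty_take3]
  have hline : ((fun p => "  " ++ p.1 ++ ": " ++ PySem.Str.join ", " (PySem.List.sorted p.2 (fun x => x) false)) ∘
      (fun k => (k, ((valid_names.filter (fun n => PySem.Str.isIn "." n)).foldl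
        (fun d n => d.modify (pyPartitionHead n) [] (fun v => v ++ [n])) PySem.Dict.empty).getD k []))) =
      (fun p => "  " ++ p ++ ": " ++ PySem.Str.join ", "
        (PySem.List.sorted ((valid_names.filter (fun n => PySem.Str.isIn "." n)).filter
          (fun n => pyPartitionHead n == p)) (fun x => x) false)) := by
    funext k
    simp only [Function.comp]
    rw [getD_by_type]
  rw [hline]
  rw [PySem.List.foldl_append_singleton_eq_map]
  rw [PySem.List.foldl_append_singleton_eq_map]

-- ===== VERDICT (by name: the statement is the Claim_ definition above) =====
theorem build_unknown_tool_error_py_spec : Claim_equal_build_unknown_tool_error_py := by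
  intro action_name valid_names _
  unfold Spec_build_unknown_tool_error_py
  exact main action_name valid_names
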